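-- pv_equiv track=rewrite | github.com/richardnixon25/SploitGPT | training/sliver/scripts/export_dataset.py | messages_to_alpaca
-- ===== SOURCE A (Python) =====
-- from typing import Dict, List, Any, Optional
--
-- def messages_to_alpaca(entry: Dict[str, Any]) -> List[Dict[str, Any]]:
--     """Convert messages format to Alpaca format (may produce multiple entries)."""
--     messages = entry.get("messages", [])
--     alpaca_entries = []
--
--     # Extract user/assistant pairs
--     i = 0
--     while i < len(messages):
--         msg = messages[i]
--         if msg.get("role") == "user":
--             # Find the next assistant response
--             for j in range(i + 1, len(messages)):
--                 if messages[j].get("role") == "assistant":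
--                     alpaca_entries.append(
--                         {
--                             "instruction": msg.get("content", ""),
--                             "input": "",
--                             "output": messages[j].get("content", ""),
--                         }
--                     )
--                     i = j
--                     break
--         i += 1
--
--     return (
--         alpaca_entries
--         if alpaca_entries
--         else [
--             {
--                 "instruction": messages[1].get("content", "") if len(messages) > 1 else "",
--                 "input": "",
--                 "output": messages[2].get("content", "") if len(messages) > 2 else "",
--             }
--         ]
--     )
-- ===== SOURCE B (Python) =====
-- def messages_to_alpaca(entry):
--     """Convert messages format to Alpaca format (may produce multiple entries)."""
--     messages = entry.get("messages", [])
--     alpaca_entries = []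
--     pending = None  # content of the first user message not yet paired with an assistant reply
--     for msg in messages:
--         role = msg.get("role")
--         if role == "user":
--             if pending is None:
--                 pending = msg.get("content", "")
--         elif role == "assistant":
--             if pending is not None:
--                 alpaca_entries.append(
--                     {"instruction": pending, "input": "", "output": msg.get("content", "")}
--                 )
--                 pending = None
--     if alpaca_entries:
--         return alpaca_entries
--     return [
--         {
--             "instruction": messages[1].get("content", "") if len(messages) > 1 else "",
--             "input": "",
--             "output": messages[2].get("content", "") if len(messages) > 2 else "",
--         }
--     ]
-- ===== Notes on version B (the rewrite author's own statement) =====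
-- stated objective: alternative
-- what changed: Replaced the index-based while loop with a nested forward scan for the next assistant message by a single pass that keeps the first unanswered user message pending and emits a pair when the next assistant message arrives; it trades A's rescanning index loop for one fold with an Option accumulator.
import Mathlib
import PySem

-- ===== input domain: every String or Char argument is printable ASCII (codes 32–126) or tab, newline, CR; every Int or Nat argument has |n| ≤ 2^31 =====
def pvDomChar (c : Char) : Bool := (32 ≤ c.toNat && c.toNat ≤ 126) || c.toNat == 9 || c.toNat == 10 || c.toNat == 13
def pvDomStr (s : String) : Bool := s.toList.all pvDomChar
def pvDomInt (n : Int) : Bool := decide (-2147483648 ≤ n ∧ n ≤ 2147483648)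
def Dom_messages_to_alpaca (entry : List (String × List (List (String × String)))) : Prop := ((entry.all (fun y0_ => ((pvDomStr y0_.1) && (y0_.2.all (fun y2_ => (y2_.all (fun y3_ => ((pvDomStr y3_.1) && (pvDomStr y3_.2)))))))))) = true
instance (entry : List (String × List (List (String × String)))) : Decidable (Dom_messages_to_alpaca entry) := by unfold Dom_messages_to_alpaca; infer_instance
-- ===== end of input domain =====

-- B replaces A's index loop with nested forward scans by a single pass keeping one pending user message (alternative algorithm, same measured cost).


-- ===== PORT A =====
-- Python dict.get over the association-list representation of a dict
def pvGet (m : List (String × String)) (k : String) : Option String := (PySem.Dict.mk m).get? k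
def pvGetD (m : List (String × String)) (k dflt : String) : String := (PySem.Dict.mk m).getD k dflt

-- inner `for j in range(i + 1, len(messages))` scan for the next assistant message
def pvScanJ (msgs : List (List (String × String))) (j : Nat) : Option Nat :=
  if h : j < msgs.length then
    if pvGet msgs[j] "role" = some "assistant" then some j
    else pvScanJ msgs (j + 1)
  else none
termination_by msgs.length - j

-- bounds of pvScanJ's result, cited by pvALoop's decreasing_by
theorem pvScanJ_bounds (msgs : List (List (String × String))) (s j : Nat)
    (h : pvScanJ msgs s = some j) : s ≤ j ∧ j < msgs.length := by
  fun_induction pvScanJ msgs s with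
  | case1 s hlt hrole => injection h with hsj; omega
  | case2 s hlt hrole ih => have := ih h; omega
  | case3 s hlt => simp_all

-- the outer `while i < len(messages)` loop of A
def pvALoop (msgs : List (List (String × String))) (i : Nat)
    (acc : List (List (String × String))) : List (List (String × String)) :=
  if h : i < msgs.length then
    if pvGet msgs[i] "role" = some "user" then
      match hj : pvScanJ msgs (i + 1) with
      | some j =>
        pvALoop msgs (j + 1)
          (acc ++ [[("instruction", pvGetD msgs[i] "content" ""),
                    ("input", ""),
                    ("output", pvGetD (msgs[j]'(pvScanJ_bounds msgs (i+1) j hj).2) "content" "")]])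
      | none => pvALoop msgs (i + 1) acc
    else pvALoop msgs (i + 1) acc
  else acc
termination_by msgs.length - i
decreasing_by
  · have := pvScanJ_bounds msgs (i+1) j hj; omega
  · omega
  · omega

def messages_to_alpaca (entry : List (String × List (List (String × String)))) : List (List (String × String)) :=
  let messages := (PySem.Dict.mk entry).getD "messages" []
  let alpaca_entries := pvALoop messages 0 []
  if alpaca_entries = [] then
    [[("instruction", if h : 1 < messages.length then pvGetD messages[1] "content" "" else ""),
      ("input", ""),
      ("output", if h : 2 < messages.length then pvGetD messages[2] "content" "" else "")]]
  else alpaca_entries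

-- ===== PORT B =====
-- single pass: `pending` is the content of the first user message not yet paired
def pvBLoop (msgs : List (List (String × String))) (pending : Option String)
    (acc : List (List (String × String))) : List (List (String × String)) :=
  match msgs with
  | [] => acc
  | m :: rest =>
    if pvGet m "role" = some "user" then
      match pending with
      | none => pvBLoop rest (some (pvGetD m "content" "")) acc
      | some _ => pvBLoop rest pending acc
    else if pvGet m "role" = some "assistant" then
      match pending with
      | some p => pvBLoop rest none
          (acc ++ [[("instruction", p), ("input", ""), ("output", pvGetD m "content" "")]])
      | none => pvBLoop rest pending acc
    else pvBLoop rest pending acc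

def messages_to_alpaca_alt (entry : List (String × List (List (String × String)))) : List (List (String × String)) :=
  let messages := (PySem.Dict.mk entry).getD "messages" []
  let alpaca_entries := pvBLoop messages none []
  if alpaca_entries = [] then
    [[("instruction", if h : 1 < messages.length then pvGetD messages[1] "content" "" else ""),
      ("input", ""),
      ("output", if h : 2 < messages.length then pvGetD messages[2] "content" "" else "")]]
  else alpaca_entries

-- ===== PRECONDITION & SPEC =====
def Spec_messages_to_alpaca (entry : List (String × List (List (String × String)))) (out : List (List (String × String))) : Prop := out = messages_to_alpaca_alt entry
instance (entry : List (String × List (List (String × String)))) (out : List (List (String × String))) : Decidable (Spec_messages_to_alpaca entry out) := by unfold Spec_messages_to_alpaca; infer_instance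

-- ===== CLAIM (what is proved, stated in full; the proofs are below) =====
def Claim_equal_messages_to_alpaca : Prop := ∀ (entry : List (String × List (List (String × String)))), Dom_messages_to_alpaca entry → Spec_messages_to_alpaca entry (messages_to_alpaca entry)

-- ===== LEMMAS AND PROOFS =====

theorem pvScanJ_none (msgs : List (List (String × String))) (s : Nat)
    (h : pvScanJ msgs s = none) :
    ∀ k, s ≤ k → (hk : k < msgs.length) → pvGet msgs[k] "role" ≠ some "assistant" := by
  fun_induction pvScanJ msgs s with
  | case1 s hlt hrole => simp_all
  | case2 s hlt hrole ih =>
    intro k hsk hk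
    rcases Nat.eq_or_lt_of_le hsk with rfl | hlt'
    · exact hrole
    · exact ih h k hlt' hk
  | case3 s hlt =>
    intro k hsk hk; omega

theorem pvScanJ_some_spec (msgs : List (List (String × String))) (s j : Nat)
    (h : pvScanJ msgs s = some j) :
    (∃ hj : j < msgs.length, pvGet msgs[j] "role" = some "assistant") ∧
    (∀ k, s ≤ k → k < j → (hk : k < msgs.length) → pvGet msgs[k] "role" ≠ some "assistant") := by
  fun_induction pvScanJ msgs s with
  | case1 s hlt hrole =>
    injection h with hsj
    subst hsj
    exact ⟨⟨hlt, hrole⟩, fun k hsk hkj hk => by omega⟩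
  | case2 s hlt hrole ih =>
    obtain ⟨h1, h2⟩ := ih h
    refine ⟨h1, ?_⟩
    intro k hsk hkj hk
    rcases Nat.eq_or_lt_of_le hsk with rfl | hlt'
    · exact hrole
    · exact h2 k hlt' hkj hk
  | case3 s hlt => simp_all

-- if no element of l has role "assistant", pvBLoop emits nothing
theorem pvBLoop_noAssist (l : List (List (String × String)))
    (hna : ∀ m ∈ l, pvGet m "role" ≠ some "assistant") :
    ∀ pending acc, pvBLoop l pending acc = acc := by
  induction l with
  | nil => intro pending acc; rfl
  | cons m rest ih =>
    intro pending acc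
    have hm : pvGet m "role" ≠ some "assistant" := hna m (by simp)
    have hrest : ∀ m' ∈ rest, pvGet m' "role" ≠ some "assistant" :=
      fun m' hm' => hna m' (by simp [hm'])
    by_cases hu : pvGet m "role" = some "user"
    · cases pending <;> simp [pvBLoop, hu, ih hrest]
    · simp [pvBLoop, hu, hm, ih hrest]

-- with a pending user, pvBLoop skips to the first assistant and emits there
theorem pvBLoop_pending (l1 : List (List (String × String)))
    (hna : ∀ m ∈ l1, pvGet m "role" ≠ some "assistant")
    (m : List (String × String)) (hm : pvGet m "role" = some "assistant")
    (l2 : List (List (String × String))) (p : String) (acc : List (List (String × String))) :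
    pvBLoop (l1 ++ m :: l2) (some p) acc =
      pvBLoop l2 none
        (acc ++ [[("instruction", p), ("input", ""), ("output", pvGetD m "content" "")]]) := by
  induction l1 with
  | nil =>
    have hmu : pvGet m "role" ≠ some "user" := by simp [hm]
    simp [pvBLoop, hm]
  | cons a l1 ih =>
    have ha : pvGet a "role" ≠ some "assistant" := hna a (by simp)
    have hrest : ∀ m' ∈ l1, pvGet m' "role" ≠ some "assistant" :=
      fun m' hm' => hna m' (by simp [hm'])
    by_cases hu : pvGet a "role" = some "user"
    · simpa [pvBLoop, hu] using ih hrest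
    · simpa [pvBLoop, hu, ha] using ih hrest

-- elements of msgs.drop s at relative positions below a bound are non-assistant
theorem drop_take_noAssist (msgs : List (List (String × String))) (s t : Nat)
    (h : ∀ k, s ≤ k → k < s + t → (hk : k < msgs.length) → pvGet msgs[k] "role" ≠ some "assistant") :
    ∀ m ∈ (msgs.drop s).take t, pvGet m "role" ≠ some "assistant" := by
  intro m hm
  obtain ⟨k, hk, hget⟩ := List.mem_iff_getElem.mp hm
  have hk1 : k < t := lt_of_lt_of_le hk (by simp [List.length_take])
  have hk2 : s + k < msgs.length := by
    have := hk; simp [List.length_take, List.length_drop] at this; omega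
  have : m = msgs[s + k] := by
    rw [← hget]; simp [List.getElem_take, List.getElem_drop]
  rw [this]
  exact h (s + k) (by omega) (by omega) hk2

-- main correspondence: A's index loop from i equals B's pass over the suffix with no pending user
theorem pvALoop_eq_pvBLoop (msgs : List (List (String × String))) (i : Nat)
    (acc : List (List (String × String))) :
    pvALoop msgs i acc = pvBLoop (msgs.drop i) none acc := by
  fun_induction pvALoop msgs i acc with
  | case1 i acc h hu j hj ih =>
    obtain ⟨his, hjl⟩ := pvScanJ_bounds msgs (i+1) j hj
    obtain ⟨⟨hjl', hrole⟩, hpre⟩ := pvScanJ_some_spec msgs (i+1) j hj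
    have hdropi : msgs.drop i = msgs[i] :: msgs.drop (i + 1) := List.drop_eq_getElem_cons h
    have hdropj : msgs.drop j = msgs[j] :: msgs.drop (j + 1) := List.drop_eq_getElem_cons hjl
    -- decompose drop (i+1) around position j
    have hsplit : msgs.drop (i + 1) =
        ((msgs.drop (i + 1)).take (j - (i + 1))) ++ msgs[j] :: msgs.drop (j + 1) := by
      conv_lhs => rw [← List.take_append_drop (j - (i+1)) (msgs.drop (i+1))]
      rw [List.drop_drop]
      have : i + 1 + (j - (i + 1)) = j := by omega
      rw [this, hdropj]
    have hna : ∀ m ∈ (msgs.drop (i + 1)).take (j - (i + 1)),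
        pvGet m "role" ≠ some "assistant" := by
      apply drop_take_noAssist
      intro k hk1 hk2 hk3
      exact hpre k hk1 (by omega) hk3
    rw [ih, hdropi]
    simp only [pvBLoop, hu]
    rw [hsplit, pvBLoop_pending _ hna _ hrole]
    simp
  | case2 i acc h hu hj ih =>
    have hdropi : msgs.drop i = msgs[i] :: msgs.drop (i + 1) := List.drop_eq_getElem_cons h
    have hna1 : ∀ k, i + 1 ≤ k → (hk : k < msgs.length) →
        pvGet msgs[k] "role" ≠ some "assistant" := pvScanJ_none msgs (i+1) hj
    have hna : ∀ m ∈ msgs.drop (i + 1), pvGet m "role" ≠ some "assistant" := by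
      have := drop_take_noAssist msgs (i+1) (msgs.length) (fun k hk1 _ hk3 => hna1 k hk1 hk3)
      simpa [List.take_of_length_le (by simp [List.length_drop] : (msgs.drop (i+1)).length ≤ msgs.length)] using this
    rw [ih, hdropi]
    simp only [pvBLoop, hu]
    rw [pvBLoop_noAssist _ hna, pvBLoop_noAssist _ hna]
    simp
  | case3 i acc h hu ih =>
    have hdropi : msgs.drop i = msgs[i] :: msgs.drop (i + 1) := List.drop_eq_getElem_cons h
    rw [ih, hdropi]
    by_cases ha : pvGet msgs[i] "role" = some "assistant"
    · simp [pvBLoop, ha]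
    · simp [pvBLoop, hu, ha]
  | case4 i acc h =>
    rw [List.drop_of_length_le (by omega)]
    rfl

-- ===== VERDICT (by name: the statement is the Claim_ definition above) =====
theorem messages_to_alpaca_spec : Claim_equal_messages_to_alpaca := by
  intro entry _
  unfold Spec_messages_to_alpaca messages_to_alpaca messages_to_alpaca_alt
  simp only [pvALoop_eq_pvBLoop, List.drop_zero]
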